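-- pv_equiv track=rewrite | github.com/oCatano/Garpix_Bag | Greedy_algorithm_2D.py | count_free_width
-- ===== SOURCE A (Python) =====
-- def last_ground_box(f_list):
--     if len(f_list) == 0:
--         return None
--     for j in range(len(f_list) - 1, -1, -1):
--         if f_list[j][0][2] == 0:
--             return f_list[j]
--
-- def count_free_width(arr_b, f_list, empty):
--     if f_list == []:
--         return len(arr_b[0]) - 1
--     elif f_list and not empty:
--         for j in range(len(f_list) - 1, -1, -1):
--             if f_list[j][0][2] == 0 and f_list[j][2][0] <= last_ground_box(f_list)[2][0]:
--                 return len(arr_b[0]) - f_list[j][1][1]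
--     elif f_list and empty:
--         return len(arr_b[0]) - 1
--
--
--     '''if (f_list == []):
--         while((arr_b[0][i] < 1) and (i < len(arr_b[0]) - 1)):
--             i+=1
--         return i
--     else:
--         for j in f_list:
--             if j[0][1] == 0 and j[0][2] == 0:
--                 x_r = j[1][0]
--         return len(arr_b[0]) - x_r'''
-- ===== SOURCE B (Python) =====
-- def count_free_width(arr_b, f_list, empty):
--     if not f_list or empty:
--         return len(arr_b[0]) - 1
--     return _last_ground_width(arr_b, f_list, len(f_list))
--
--
-- def _last_ground_width(arr_b, f_list, n):
--     """Peel boxes from the back recursively until a ground box is found."""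
--     if n == 0:
--         return None
--     box = f_list[n - 1]
--     if box[0][2] == 0:
--         return len(arr_b[0]) - box[1][1]
--     return _last_ground_width(arr_b, f_list, n - 1)
-- ===== Notes on version B (the rewrite author's own statement) =====
-- stated objective: simpler
-- what changed: A's index loop whose condition re-scans the whole list via last_ground_box only to compare the last ground box's x with itself is replaced by a single backward recursion that stops at the first ground box from the end and never reads box[2] or calls a second scan.
import Mathlib
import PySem

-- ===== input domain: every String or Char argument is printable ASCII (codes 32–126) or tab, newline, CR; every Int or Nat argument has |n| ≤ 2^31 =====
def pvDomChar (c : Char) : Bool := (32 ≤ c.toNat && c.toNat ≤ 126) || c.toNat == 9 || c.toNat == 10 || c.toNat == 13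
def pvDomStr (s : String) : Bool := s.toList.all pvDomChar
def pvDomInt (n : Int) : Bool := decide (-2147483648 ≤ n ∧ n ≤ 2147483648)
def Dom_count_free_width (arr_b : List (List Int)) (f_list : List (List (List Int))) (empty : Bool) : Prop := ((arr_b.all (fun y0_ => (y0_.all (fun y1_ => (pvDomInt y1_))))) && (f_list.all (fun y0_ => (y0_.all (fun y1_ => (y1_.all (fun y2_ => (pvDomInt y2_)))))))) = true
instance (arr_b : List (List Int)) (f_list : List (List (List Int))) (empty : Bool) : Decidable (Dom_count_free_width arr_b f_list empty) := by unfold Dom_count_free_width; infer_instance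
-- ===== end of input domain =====

-- B (simpler): A's index loop, whose condition re-scans the list via last_ground_box only to
-- compare the last ground box with itself, becomes one backward recursion that returns at the
-- first ground box from the end, never reading box[2] and never re-scanning.

-- ===== PORT A =====

-- one iteration of last_ground_box's backward loop at index j; cont = rest of the loop
def lgbStep (f_list : List (List (List Int))) (j : Nat)
    (cont : Option (List (List Int))) : Option (List (List Int)) :=
  match PySem.List.pyGet? f_list (j : Int) with
  | none => none      -- IndexError (unreachable: j < len)
  | some b =>
    match (PySem.List.pyGet? b 0).bind (fun h => PySem.List.pyGet? h 2) with
    | none => none    -- IndexError on f_list[j][0][2]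
    | some v => if v = 0 then some b else cont

def lgbGo (f_list : List (List (List Int))) : Nat → Option (List (List Int))
  | 0 => lgbStep f_list 0 none
  | j + 1 => lgbStep f_list (j + 1) (lgbGo f_list j)

def last_ground_box (f_list : List (List (List Int))) : Option (List (List Int)) :=
  if f_list.length = 0 then none
  else lgbGo f_list (f_list.length - 1)

-- one iteration of count_free_width's backward loop at index j; cont = rest of the loop
def cfwStep (arr_b : List (List Int)) (f_list : List (List (List Int))) (j : Nat)
    (cont : Option Int) : Option Int :=
  match PySem.List.pyGet? f_list (j : Int) with
  | none => none      -- IndexError (unreachable: j < len)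
  | some b =>
    match (PySem.List.pyGet? b 0).bind (fun h => PySem.List.pyGet? h 2) with
    | none => none    -- IndexError on f_list[j][0][2]
    | some v =>
      if v = 0 then
        match (PySem.List.pyGet? b 2).bind (fun r => PySem.List.pyGet? r 0),
              (last_ground_box f_list).bind
                (fun g => (PySem.List.pyGet? g 2).bind (fun r => PySem.List.pyGet? r 0)) with
        | some x, some y =>
          if x ≤ y then
            match PySem.List.pyGet? arr_b 0,
                  (PySem.List.pyGet? b 1).bind (fun r => PySem.List.pyGet? r 1) with
            | some row, some w => some ((row.length : Int) - w)
            | _, _ => none   -- IndexError on arr_b[0] or f_list[j][1][1]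
          else cont
        | _, _ => none       -- IndexError / None[2] TypeError
      else cont

def cfwGo (arr_b : List (List Int)) (f_list : List (List (List Int))) : Nat → Option Int
  | 0 => cfwStep arr_b f_list 0 none
  | j + 1 => cfwStep arr_b f_list (j + 1) (cfwGo arr_b f_list j)

def count_free_width (arr_b : List (List Int)) (f_list : List (List (List Int))) (empty : Bool) : Option Int :=
  if f_list = [] then
    match PySem.List.pyGet? arr_b 0 with
    | none => none   -- IndexError on arr_b[0]
    | some row => some ((row.length : Int) - 1)
  else if !empty then
    cfwGo arr_b f_list (f_list.length - 1)
  else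
    match PySem.List.pyGet? arr_b 0 with
    | none => none   -- IndexError on arr_b[0]
    | some row => some ((row.length : Int) - 1)

-- ===== PORT B =====

-- _last_ground_width(arr_b, f_list, n): recursion peeling boxes from the back
def lastGroundWidth (arr_b : List (List Int)) (f_list : List (List (List Int))) : Nat → Option Int
  | 0 => none                              -- return None
  | n + 1 =>
    match PySem.List.pyGet? f_list (n : Int) with   -- box = f_list[n - 1]
    | none => none   -- IndexError (unreachable: n < len)
    | some box =>
      match (PySem.List.pyGet? box 0).bind (fun h => PySem.List.pyGet? h 2) with
      | none => none -- IndexError on box[0][2]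
      | some v =>
        if v = 0 then
          match PySem.List.pyGet? arr_b 0,
                (PySem.List.pyGet? box 1).bind (fun r => PySem.List.pyGet? r 1) with
          | some row, some w => some ((row.length : Int) - w)
          | _, _ => none   -- IndexError on arr_b[0] or box[1][1]
        else lastGroundWidth arr_b f_list n

def count_free_width_alt (arr_b : List (List Int)) (f_list : List (List (List Int))) (empty : Bool) : Option Int :=
  if f_list.isEmpty || empty then
    match PySem.List.pyGet? arr_b 0 with
    | none => none   -- IndexError on arr_b[0]
    | some row => some ((row.length : Int) - 1)
  else lastGroundWidth arr_b f_list f_list.length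

-- ===== PRECONDITION & SPEC =====

-- a scanned non-ground box: f_list[j][0][2] readable and nonzero
def gnB (b : List (List Int)) : Bool :=
  decide (1 ≤ b.length) && decide (3 ≤ (b[0]?.getD []).length) &&
  decide ((b[0]?.getD [])[2]?.getD 0 ≠ 0)
-- the last ground box: every index A reads on it is in range
def ggB (b : List (List Int)) : Bool :=
  decide (3 ≤ b.length) && decide (3 ≤ (b[0]?.getD []).length) &&
  decide ((b[0]?.getD [])[2]?.getD 0 = 0) &&
  decide (2 ≤ (b[1]?.getD []).length) && decide (1 ≤ (b[2]?.getD []).length)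

def preB (arr_b : List (List Int)) (f_list : List (List (List Int))) (empty : Bool) : Bool :=
  if f_list = [] then decide (arr_b ≠ [])
  else if empty then decide (arr_b ≠ [])
  else (List.range (f_list.length + 1)).any (fun k =>
    ((List.range f_list.length).all (fun j => decide (j < k) || gnB (f_list[j]?.getD []))) &&
    (decide (k = 0) || (decide (arr_b ≠ []) && ggB (f_list[k - 1]?.getD []))))

-- Pre_ is exactly the set of inputs on which A returns (everything it excludes makes A raise
-- IndexError): on the two width-1 branches arr_b must be nonempty, and on the scanning branch
-- the boxes A actually reads — the suffix after the last ground box and that box itself —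
-- must expose the indices A takes (k is the index just after the last ground box; k = 0 means
-- no ground box is found and A returns None without touching arr_b).
def Pre_count_free_width (arr_b : List (List Int)) (f_list : List (List (List Int))) (empty : Bool) : Prop :=
  preB arr_b f_list empty = true

instance (arr_b : List (List Int)) (f_list : List (List (List Int))) (empty : Bool) : Decidable (Pre_count_free_width arr_b f_list empty) := by
  unfold Pre_count_free_width; infer_instance

def pvWitness_count_free_width : List (List Int) × List (List (List Int)) × Bool :=
  ([[1, 2, 3]], [[[0, 0, 0], [4, 2], [5]]], false)

def Spec_count_free_width (arr_b : List (List Int)) (f_list : List (List (List Int))) (empty : Bool) (out : Option Int) : Prop := out = count_free_width_alt arr_b f_list empty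
instance (arr_b : List (List Int)) (f_list : List (List (List Int))) (empty : Bool) (out : Option Int) : Decidable (Spec_count_free_width arr_b f_list empty out) := by unfold Spec_count_free_width; infer_instance

-- ===== CLAIM (what is proved, stated in full; the proofs are below) =====
def Claim_equal_count_free_width : Prop := ∀ (arr_b : List (List Int)) (f_list : List (List (List Int))) (empty : Bool), Dom_count_free_width arr_b f_list empty → Pre_count_free_width arr_b f_list empty → Spec_count_free_width arr_b f_list empty (count_free_width arr_b f_list empty)

-- ===== LEMMAS AND PROOFS =====

-- Prop forms of the two box conditions, used by the proofs
def GN (b : List (List Int)) : Prop :=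
  1 ≤ b.length ∧ 3 ≤ (b[0]?.getD []).length ∧ (b[0]?.getD [])[2]?.getD 0 ≠ 0
def GG (b : List (List Int)) : Prop :=
  3 ≤ b.length ∧ 3 ≤ (b[0]?.getD []).length ∧ (b[0]?.getD [])[2]?.getD 0 = 0 ∧
  2 ≤ (b[1]?.getD []).length ∧ 1 ≤ (b[2]?.getD []).length

theorem chk02 (b : List (List Int)) (h1 : 1 ≤ b.length) (h2 : 3 ≤ (b[0]?.getD []).length) :
    (PySem.List.pyGet? b 0).bind (fun h => PySem.List.pyGet? h 2)
      = some ((b[0]?.getD [])[2]?.getD 0) := by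
  match b, h1 with
  | b0 :: t, _ =>
    match b0, h2 with
    | x :: y :: z :: r, _ => simp [PySem.List.pyGet?, PySem.List.pyIdx?]

theorem chk11 (b : List (List Int)) (h1 : 2 ≤ b.length) (h2 : 2 ≤ (b[1]?.getD []).length) :
    (PySem.List.pyGet? b 1).bind (fun r => PySem.List.pyGet? r 1)
      = some ((b[1]?.getD [])[1]?.getD 0) := by
  match b, h1 with
  | b0 :: b1 :: t, _ =>
    match b1, h2 with
    | u :: v :: r, _ =>
      simp [PySem.List.pyGet?, PySem.List.pyIdx?]

theorem chk20 (b : List (List Int)) (h1 : 3 ≤ b.length) (h2 : 1 ≤ (b[2]?.getD []).length) :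
    (PySem.List.pyGet? b 2).bind (fun r => PySem.List.pyGet? r 0)
      = some ((b[2]?.getD [])[0]?.getD 0) := by
  match b, h1 with
  | b0 :: b1 :: b2 :: t, _ =>
    match b2, h2 with
    | u :: r, _ =>
      simp [PySem.List.pyGet?, PySem.List.pyIdx?]
      rw [if_pos (by omega)]
      simp

theorem pyGet?_head (arr_b : List (List Int)) (ha : arr_b ≠ []) :
    PySem.List.pyGet? arr_b 0 = some (arr_b[0]?.getD []) := by
  cases arr_b with
  | nil => exact absurd rfl ha
  | cons x t => simp [PySem.List.pyGet?, PySem.List.pyIdx?]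

theorem pyGet?_getD (f_list : List (List (List Int))) (j : Nat) (hj : j < f_list.length) :
    PySem.List.pyGet? f_list (j : Int) = some (f_list[j]?.getD []) := by
  rw [PySem.List.pyGet?_natCast, List.getElem?_eq_getElem hj]
  rfl

theorem pyGet?_zero (f_list : List (List (List Int))) (hj : 0 < f_list.length) :
    PySem.List.pyGet? f_list 0 = some (f_list[0]?.getD []) := by
  cases f_list with
  | nil => simp at hj
  | cons x t => simp [PySem.List.pyGet?, PySem.List.pyIdx?]

-- last_ground_box's loop finds exactly the box at index k−1 (or nothing if k = 0)
theorem lgbGo_eval (f_list : List (List (List Int))) (k : Nat)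
    (hGN : ∀ j < f_list.length, k ≤ j → GN (f_list[j]?.getD []))
    (hG : k = 0 ∨ GG (f_list[k - 1]?.getD [])) :
    ∀ j, j < f_list.length → k ≤ j + 1 →
      lgbGo f_list j = if k = 0 then none else some (f_list[k - 1]?.getD []) := by
  intro j
  induction j with
  | zero =>
    intro hj hk
    show lgbStep f_list 0 none = _
    unfold lgbStep
    simp only [Nat.cast_zero, pyGet?_zero f_list hj, pyGet?_getD f_list 0 hj]
    rcases Nat.le_one_iff_eq_zero_or_eq_one.mp hk with h0 | h1
    · obtain ⟨hb0, hb1, hb2⟩ := hGN 0 hj (by omega)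
      simp only [chk02 _ hb0 hb1]
      simp [h0, hb2]
    · subst h1
      obtain ⟨hg1, hg2, hg3, -, -⟩ := hG.resolve_left (by omega)
      simp only [Nat.sub_self] at hg1 hg2 hg3
      simp only [chk02 _ (by omega : 1 ≤ (f_list[0]?.getD []).length) hg2]
      simp [hg3]
  | succ j ih =>
    intro hj hk
    show lgbStep f_list (j + 1) (lgbGo f_list j) = _
    unfold lgbStep
    simp only [pyGet?_getD f_list (j + 1) hj]
    by_cases hkj : k = j + 2
    · subst hkj
      obtain ⟨hg1, hg2, hg3, -, -⟩ := hG.resolve_left (by omega)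
      have hk1 : j + 2 - 1 = j + 1 := by omega
      rw [hk1] at hg1 hg2 hg3 ⊢
      simp only [chk02 _ (by omega : 1 ≤ (f_list[j + 1]?.getD []).length) hg2]
      simp [hg3]
    · have hkle : k ≤ j + 1 := by omega
      obtain ⟨hb0, hb1, hb2⟩ := hGN (j + 1) hj hkle
      simp only [chk02 _ hb0 hb1]
      simp only [if_neg hb2]
      exact ih (by omega) (by omega)

-- A's ground step returns width − box[1][1] (the self-comparison succeeds)
theorem ground_step (arr_b : List (List Int)) (f_list : List (List (List Int))) (k : Nat)
    (hGN : ∀ j < f_list.length, k ≤ j → GN (f_list[j]?.getD []))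
    (hG : k = 0 ∨ (arr_b ≠ [] ∧ GG (f_list[k - 1]?.getD [])))
    (j : Nat) (hj : j < f_list.length) (hkj : k = j + 1) (cont : Option Int) :
    cfwStep arr_b f_list j cont
      = some (((arr_b[0]?.getD []).length : Int) - ((f_list[j]?.getD [])[1]?.getD [])[1]?.getD 0) := by
  obtain ⟨ha, hg⟩ := hG.resolve_left (by omega)
  have hk1 : k - 1 = j := by omega
  rw [hk1] at hg
  obtain ⟨hg1, hg2, hg3, hg4, hg5⟩ := hg
  unfold cfwStep
  simp only [pyGet?_getD f_list j hj]
  simp only [chk02 _ (by omega : 1 ≤ (f_list[j]?.getD []).length) hg2]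
  simp only [hg3, if_pos rfl]
  have hlgb : last_ground_box f_list = some (f_list[j]?.getD []) := by
    unfold last_ground_box
    rw [if_neg (by omega)]
    rw [lgbGo_eval f_list k hGN (hG.imp id And.right) (f_list.length - 1) (by omega) (by omega)]
    rw [if_neg (by omega), hk1]
  rw [hlgb]
  simp only [Option.bind_some]
  simp only [chk20 _ hg1 hg5]
  simp only [pyGet?_head arr_b ha, chk11 _ (by omega : 2 ≤ (f_list[j]?.getD []).length) hg4]
  simp

-- B's ground step returns the same value
theorem groundB_step (arr_b : List (List Int)) (f_list : List (List (List Int))) (k : Nat)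
    (hG : k = 0 ∨ (arr_b ≠ [] ∧ GG (f_list[k - 1]?.getD [])))
    (j : Nat) (hj : j < f_list.length) (hkj : k = j + 1) :
    lastGroundWidth arr_b f_list (j + 1)
      = some (((arr_b[0]?.getD []).length : Int) - ((f_list[j]?.getD [])[1]?.getD [])[1]?.getD 0) := by
  obtain ⟨ha, hg⟩ := hG.resolve_left (by omega)
  have hk1 : k - 1 = j := by omega
  rw [hk1] at hg
  obtain ⟨hg1, hg2, hg3, hg4, hg5⟩ := hg
  simp only [lastGroundWidth]
  simp only [pyGet?_getD f_list j hj]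
  simp only [chk02 _ (by omega : 1 ≤ (f_list[j]?.getD []).length) hg2]
  simp only [hg3, if_pos rfl]
  simp only [pyGet?_head arr_b ha, chk11 _ (by omega : 2 ≤ (f_list[j]?.getD []).length) hg4]
  simp

-- B's non-ground step just recurses
theorem nongroundB_step (arr_b : List (List Int)) (f_list : List (List (List Int)))
    (j : Nat) (hj : j < f_list.length)
    (hb : GN (f_list[j]?.getD [])) :
    lastGroundWidth arr_b f_list (j + 1) = lastGroundWidth arr_b f_list j := by
  obtain ⟨hb0, hb1, hb2⟩ := hb
  conv_lhs => rw [lastGroundWidth]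
  simp only [pyGet?_getD f_list j hj]
  simp only [chk02 _ hb0 hb1]
  simp [hb2]

-- main loop lemma: A's backward loop and B's backward recursion agree
theorem go_eval (arr_b : List (List Int)) (f_list : List (List (List Int))) (k : Nat)
    (hGN : ∀ j < f_list.length, k ≤ j → GN (f_list[j]?.getD []))
    (hG : k = 0 ∨ (arr_b ≠ [] ∧ GG (f_list[k - 1]?.getD []))) :
    ∀ j, j < f_list.length → k ≤ j + 1 →
      cfwGo arr_b f_list j = lastGroundWidth arr_b f_list (j + 1) := by
  intro j
  induction j with
  | zero =>
    intro hj hk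
    rcases Nat.le_one_iff_eq_zero_or_eq_one.mp hk with h0 | h1
    · -- k = 0: box 0 is non-ground, both fall through to none
      obtain ⟨hb0, hb1, hb2⟩ := hGN 0 hj (by omega)
      show cfwStep arr_b f_list 0 none = _
      unfold cfwStep
      simp only [Nat.cast_zero, pyGet?_zero f_list hj, pyGet?_getD f_list 0 hj]
      simp only [chk02 _ hb0 hb1]
      simp only [if_neg hb2]
      rw [nongroundB_step arr_b f_list 0 hj ⟨hb0, hb1, hb2⟩]
      rfl
    · show cfwStep arr_b f_list 0 none = _
      rw [ground_step arr_b f_list k hGN hG 0 hj (by omega) none,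
          groundB_step arr_b f_list k hG 0 hj (by omega)]
  | succ j ih =>
    intro hj hk
    by_cases hkj : k = j + 2
    · show cfwStep arr_b f_list (j + 1) (cfwGo arr_b f_list j) = _
      rw [ground_step arr_b f_list k hGN hG (j + 1) hj hkj _,
          groundB_step arr_b f_list k hG (j + 1) hj hkj]
    · have hkle : k ≤ j + 1 := by omega
      obtain ⟨hb0, hb1, hb2⟩ := hGN (j + 1) hj hkle
      show cfwStep arr_b f_list (j + 1) (cfwGo arr_b f_list j) = _
      unfold cfwStep
      simp only [pyGet?_getD f_list (j + 1) hj]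
      simp only [chk02 _ hb0 hb1]
      simp only [if_neg hb2]
      rw [nongroundB_step arr_b f_list (j + 1) hj ⟨hb0, hb1, hb2⟩]
      exact ih (by omega) hkle

-- ===== VERDICT (by name: the statement is the Claim_ definition above) =====
theorem count_free_width_spec : Claim_equal_count_free_width := by
  intro arr_b f_list empty _ hpre
  unfold Spec_count_free_width count_free_width count_free_width_alt
  unfold Pre_count_free_width preB at hpre
  by_cases hfe : f_list = []
  · rw [if_pos hfe] at hpre
    replace hpre : arr_b ≠ [] := by simpa using hpre
    rw [pyGet?_head arr_b hpre]
    simp [hfe]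
  · rw [if_neg hfe] at hpre
    have hfe' : f_list.isEmpty = false := by simpa using hfe
    cases empty with
    | true =>
      rw [if_pos rfl] at hpre
      replace hpre : arr_b ≠ [] := by simpa using hpre
      rw [pyGet?_head arr_b hpre]
      simp [hfe, hfe']
    | false =>
      rw [if_neg (by simp)] at hpre
      rw [List.any_eq_true] at hpre
      obtain ⟨k, hkmem, hk⟩ := hpre
      rw [List.mem_range] at hkmem
      rw [Bool.and_eq_true] at hk
      obtain ⟨hall, hor⟩ := hk
      have hGN : ∀ j < f_list.length, k ≤ j → GN (f_list[j]?.getD []) := by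
        intro j hj hkj
        have h := List.all_eq_true.mp hall j (List.mem_range.mpr hj)
        rw [Bool.or_eq_true] at h
        rcases h with h | h
        · exact absurd (of_decide_eq_true h) (by omega)
        · unfold gnB at h
          simp only [Bool.and_eq_true, decide_eq_true_eq] at h
          exact ⟨h.1.1, h.1.2, h.2⟩
      have hG : k = 0 ∨ (arr_b ≠ [] ∧ GG (f_list[k - 1]?.getD [])) := by
        rw [Bool.or_eq_true] at hor
        rcases hor with h | h
        · exact Or.inl (of_decide_eq_true h)
        · rw [Bool.and_eq_true] at h
          obtain ⟨h1, h2⟩ := h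
          refine Or.inr ⟨of_decide_eq_true h1, ?_⟩
          unfold ggB at h2
          simp only [Bool.and_eq_true, decide_eq_true_eq] at h2
          exact ⟨h2.1.1.1.1, h2.1.1.1.2, h2.1.1.2, h2.1.2, h2.2⟩
      have hlen : 0 < f_list.length := List.length_pos_of_ne_nil hfe
      rw [if_neg hfe, if_pos (show (!false) = true from rfl),
          if_neg (show ¬ ((f_list.isEmpty || false) = true) by simp [hfe'])]
      have h := go_eval arr_b f_list k hGN hG (f_list.length - 1) (by omega) (by omega)
      rw [h]
      have hlen1 : f_list.length - 1 + 1 = f_list.length := by omega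
      rw [hlen1]
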